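-- pv_equiv track=rewrite | github.com/pvlinh1904-byte/linh | uet/Homework5/W6A23.py | xoa_nho_hon_x
-- ===== SOURCE A (Python) =====
-- def xoa_nho_hon_x(L, x):
--     i = 0
--     while i < len(L):
--         if L[i] < x:
--             L.pop(i)
--         else:
--             i += 1
--     return L
-- ===== SOURCE B (Python) =====
-- def xoa_nho_hon_x(L, x):
--     w = 0
--     for r in range(len(L)):
--         if L[r] >= x:
--             L[w] = L[r]
--             w += 1
--     del L[w:]
--     return L
-- ===== Notes on version B (the rewrite author's own statement) =====
-- stated objective: faster
-- what changed: Replaces the pop-in-a-while-loop (each pop shifts the tail) with a single forward pass that compacts surviving elements to a write index and truncates the tail once, mutating the same list object.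
import Mathlib
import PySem

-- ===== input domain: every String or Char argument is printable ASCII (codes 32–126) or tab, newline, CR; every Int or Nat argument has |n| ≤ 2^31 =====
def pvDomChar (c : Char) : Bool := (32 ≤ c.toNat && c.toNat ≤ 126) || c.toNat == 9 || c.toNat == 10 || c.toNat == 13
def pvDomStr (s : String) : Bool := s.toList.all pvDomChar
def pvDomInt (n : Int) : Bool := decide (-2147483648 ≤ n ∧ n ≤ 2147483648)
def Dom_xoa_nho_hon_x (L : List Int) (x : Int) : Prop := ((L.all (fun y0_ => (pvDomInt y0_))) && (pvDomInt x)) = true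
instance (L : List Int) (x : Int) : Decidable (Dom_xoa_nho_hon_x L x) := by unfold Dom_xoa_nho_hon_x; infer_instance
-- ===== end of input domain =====

-- B replaces A's pop-in-a-while-loop by a single forward compaction pass with a write index
-- plus one truncation (both Pythons mutate L in place; the claim is about the returned value,
-- which is also the mutated list's final contents).


-- ===== PORT A =====
-- i = 0; while i < len(L): if L[i] < x: L.pop(i) else: i += 1; return L
def xoaA_loop (x : Int) (L : List Int) (i : Nat) : List Int :=
  if h : i < L.length then
    if L[i] < x then xoaA_loop x (L.eraseIdx i) i
    else xoaA_loop x L (i + 1)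
  else L
termination_by L.length - i
decreasing_by
  all_goals (try rw [List.length_eraseIdx]); (try split) <;> omega

def xoa_nho_hon_x (L : List Int) (x : Int) : List Int := xoaA_loop x L 0

-- ===== PORT B =====
-- w = 0; for r in range(len(L)): if L[r] >= x: L[w] = L[r]; w += 1; del L[w:]; return L
def xoa_nho_hon_x_alt (L : List Int) (x : Int) : List Int :=
  let st := (List.range L.length).foldl
    (fun (st : List Int × Nat) r =>
      if x ≤ st.1[r]! then (st.1.set st.2 st.1[r]!, st.2 + 1) else st)
    (L, 0)
  st.1.take st.2

-- ===== PRECONDITION & SPEC =====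
def Spec_xoa_nho_hon_x (L : List Int) (x : Int) (out : List Int) : Prop := out = xoa_nho_hon_x_alt L x
instance (L : List Int) (x : Int) (out : List Int) : Decidable (Spec_xoa_nho_hon_x L x out) := by unfold Spec_xoa_nho_hon_x; infer_instance

-- ===== CLAIM (what is proved, stated in full; the proofs are below) =====
def Claim_equal_xoa_nho_hon_x : Prop := ∀ (L : List Int) (x : Int), Dom_xoa_nho_hon_x L x → Spec_xoa_nho_hon_x L x (xoa_nho_hon_x L x)

-- ===== LEMMAS AND PROOFS =====

theorem xoaA_loop_eq (x : Int) (L : List Int) (i : Nat) :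
    xoaA_loop x L i = L.take i ++ (L.drop i).filter (fun a => decide (x ≤ a)) := by
  rw [xoaA_loop]
  split
  · next h =>
    have hdrop : L.drop i = L[i] :: L.drop (i + 1) := List.drop_eq_getElem_cons h
    split
    · next hlt =>
      rw [xoaA_loop_eq x (L.eraseIdx i) i]
      rw [List.eraseIdx_eq_take_drop_succ]
      have htk : (L.take i).length = i := by simp; omega
      rw [List.take_append_of_le_length (by omega), List.take_take,
          List.drop_append_of_le_length (by omega)]
      have hnx : ¬ x ≤ L[i] := by omega
      have h0 : List.drop i (List.take i L) = [] := by
        rw [List.drop_take]; simp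
      rw [h0, List.nil_append, hdrop, List.filter_cons]
      simp [hnx]
    · next hge =>
      rw [xoaA_loop_eq x L (i + 1)]
      have hx : x ≤ L[i] := by omega
      have ht : L.take (i + 1) = L.take i ++ [L[i]] := by
        rw [List.take_add_one, List.getElem?_eq_getElem h]; rfl
      rw [hdrop, List.filter_cons, ht, List.append_assoc]
      simp [hx]
  · next h =>
    simp [List.drop_eq_nil_of_le (by omega : L.length ≤ i),
          List.take_of_length_le (by omega : L.length ≤ i)]
termination_by L.length - i
decreasing_by
  all_goals (try rw [List.length_eraseIdx]); (try split) <;> omega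

theorem xoaB_inv (x : Int) (L : List Int) (n : Nat) (hn : n ≤ L.length) :
    ((List.range n).foldl
      (fun (st : List Int × Nat) r =>
        if x ≤ st.1[r]! then (st.1.set st.2 st.1[r]!, st.2 + 1) else st)
      (L, 0)).2 ≤ n ∧
    ((List.range n).foldl
      (fun (st : List Int × Nat) r =>
        if x ≤ st.1[r]! then (st.1.set st.2 st.1[r]!, st.2 + 1) else st)
      (L, 0)).1.length = L.length ∧
    ((List.range n).foldl
      (fun (st : List Int × Nat) r =>
        if x ≤ st.1[r]! then (st.1.set st.2 st.1[r]!, st.2 + 1) else st)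
      (L, 0)).1.take ((List.range n).foldl
      (fun (st : List Int × Nat) r =>
        if x ≤ st.1[r]! then (st.1.set st.2 st.1[r]!, st.2 + 1) else st)
      (L, 0)).2 = (L.take n).filter (fun a => decide (x ≤ a)) ∧
    ((List.range n).foldl
      (fun (st : List Int × Nat) r =>
        if x ≤ st.1[r]! then (st.1.set st.2 st.1[r]!, st.2 + 1) else st)
      (L, 0)).1.drop n = L.drop n := by
  induction n with
  | zero => simp
  | succ n ih =>
    have hn' : n ≤ L.length := by omega
    obtain ⟨hw, hlen, htake, hdropn⟩ := ih hn'
    set st := (List.range n).foldl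
      (fun (st : List Int × Nat) r =>
        if x ≤ st.1[r]! then (st.1.set st.2 st.1[r]!, st.2 + 1) else st)
      (L, 0) with hst
    obtain ⟨buf, w⟩ := st
    simp only at hw hlen htake hdropn
    have hnL : n < L.length := by omega
    have hnlen : n < buf.length := by omega
    have hbn : buf[n] = L[n] := by
      have h0 : buf[n]? = L[n]? := by
        have h1 := congrArg (fun l : List Int => l[0]?) hdropn
        simpa [List.getElem?_drop] using h1
      rw [List.getElem?_eq_getElem hnlen, List.getElem?_eq_getElem hnL] at h0
      exact Option.some.inj h0
    have hget : buf[n]! = L[n] := by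
      rw [getElem!_pos buf n hnlen, hbn]
    rw [List.range_succ, List.foldl_append, ← hst]
    simp only [List.foldl_cons, List.foldl_nil]
    have hLtake : L.take (n + 1) = L.take n ++ [L[n]] := by
      rw [List.take_add_one, List.getElem?_eq_getElem hnL]; rfl
    by_cases hx : x ≤ buf[n]!
    · simp only [hx, if_pos]
      refine ⟨by omega, by simp [hlen], ?_, ?_⟩
      · have hset : buf.set w buf[n]! = buf.take w ++ buf[n]! :: buf.drop (w + 1) :=
          List.set_eq_take_cons_drop _ (by omega)
        rw [hset, List.take_append]
        have hwl : (buf.take w).length = w := by simp; omega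
        rw [hwl, Nat.add_sub_cancel_left, List.take_take]
        have hmin : min (w + 1) w = w := by omega
        rw [hmin, htake, hLtake, List.filter_append, List.filter_cons]
        have hx' : x ≤ L[n] := by rw [← hget]; exact hx
        simp [hx', hget]
      · have hdset : (buf.set w buf[n]!).drop (n + 1) = buf.drop (n + 1) := by
          apply List.ext_getElem (by simp)
          intro k hk1 hk2
          simp only [List.getElem_drop, List.getElem_set]
          have hne : w ≠ n + 1 + k := by omega
          simp [hne]
        have hd : buf.drop (n + 1) = (buf.drop n).drop 1 := by
          rw [List.drop_drop, Nat.add_comm]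
        rw [hdset, hd, hdropn, List.drop_drop, Nat.add_comm]
    · simp only [hx, if_neg, not_false_iff]
      refine ⟨by omega, hlen, ?_, ?_⟩
      · rw [htake, hLtake, List.filter_append, List.filter_cons]
        have hnx : ¬ x ≤ L[n] := by rw [← hget]; exact hx
        simp [hnx]
      · have hd : buf.drop (n + 1) = (buf.drop n).drop 1 := by
          rw [List.drop_drop, Nat.add_comm]
        rw [hd, hdropn, List.drop_drop, Nat.add_comm]

theorem xoaB_eq (L : List Int) (x : Int) :
    xoa_nho_hon_x_alt L x = L.filter (fun a => decide (x ≤ a)) := by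
  unfold xoa_nho_hon_x_alt
  obtain ⟨-, -, htake, -⟩ := xoaB_inv x L L.length le_rfl
  simpa using htake

-- ===== VERDICT (by name: the statement is the Claim_ definition above) =====
theorem xoa_nho_hon_x_spec : Claim_equal_xoa_nho_hon_x := by
  intro L x _
  unfold Spec_xoa_nho_hon_x
  rw [xoaB_eq]
  unfold xoa_nho_hon_x
  rw [xoaA_loop_eq]
  simp
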